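-- pv_equiv track=rewrite | github.com/facebookincubator/cinderx | cinderx/benchmarks/immortal_decref.py | bench_not
-- ===== SOURCE A (Python) =====
-- def bench_not(n: int) -> int:
--     count = 0
--     flag = False
--     for _ in range(n):
--         flag = not flag
--         if flag:
--             count += 1
--     return count
-- ===== SOURCE B (Python) =====
-- def bench_not(n: int) -> int:
--     # closed form: the flag is True on every odd-numbered iteration,
--     # so the count is ceil(n/2), and 0 for non-positive n
--     return max(0, (n + 1) // 2)
-- ===== Notes on version B (the rewrite author's own statement) =====
-- stated objective: faster
-- what changed: replaced the O(n) toggle-and-count loop with the closed form max(0,(n+1)//2)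
import Mathlib
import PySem

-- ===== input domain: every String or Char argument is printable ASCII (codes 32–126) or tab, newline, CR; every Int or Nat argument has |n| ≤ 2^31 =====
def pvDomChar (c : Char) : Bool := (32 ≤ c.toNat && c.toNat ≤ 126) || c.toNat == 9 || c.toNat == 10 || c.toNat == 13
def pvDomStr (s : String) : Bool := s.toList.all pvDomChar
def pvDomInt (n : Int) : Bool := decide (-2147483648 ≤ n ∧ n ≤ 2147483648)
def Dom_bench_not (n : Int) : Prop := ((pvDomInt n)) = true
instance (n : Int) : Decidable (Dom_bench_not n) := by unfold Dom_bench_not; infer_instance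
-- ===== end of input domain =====

-- B replaces A's O(n) toggle-and-count loop by the closed form max(0,(n+1)//2) (objective: faster).

-- ===== PORT A =====
-- literal port: loop over range(n) carrying (count, flag), toggling flag and counting Trues
def bench_not (n : Int) : Int :=
  (PySem.List.pyRange 0 n 1).foldl
    (fun (st : Int × Bool) _ =>
      let flag := !st.2
      (if flag then st.1 + 1 else st.1, flag))
    (0, false) |>.1

-- ===== PORT B =====
def bench_not_alt (n : Int) : Int := max 0 (PySem.Int.floordiv (n + 1) 2)

-- ===== PRECONDITION & SPEC =====
def Spec_bench_not (n : Int) (out : Int) : Prop := out = bench_not_alt n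
instance (n : Int) (out : Int) : Decidable (Spec_bench_not n out) := by unfold Spec_bench_not; infer_instance

-- ===== CLAIM (what is proved, stated in full; the proofs are below) =====
def Claim_equal_bench_not : Prop := ∀ (n : Int), Dom_bench_not n → Spec_bench_not n (bench_not n)

-- ===== LEMMAS AND PROOFS =====

-- loop invariant: starting from (c, flag), folding over any list adds
-- (length + (1 if flag was False else 0)) / 2 trues
theorem bench_not_foldl {α : Type} (l : List α) (c : Int) (flag : Bool) :
    (l.foldl
      (fun (st : Int × Bool) _ =>
        let f := !st.2
        (if f then st.1 + 1 else st.1, f))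
      (c, flag)).1
    = c + ((l.length + (if flag then 0 else 1)) / 2 : Nat) := by
  induction l generalizing c flag with
  | nil => cases flag <;> simp
  | cons x xs ih =>
    cases flag <;>
      simp only [List.foldl_cons, Bool.not_false, Bool.not_true, if_true, ih, List.length_cons] <;>
      push_cast <;> omega

theorem bench_not_spec : Claim_equal_bench_not := by
  intro n _
  unfold Spec_bench_not bench_not bench_not_alt
  rw [PySem.Int.floordiv_eq_ediv_of_pos (by norm_num)]
  rw [PySem.List.pyRange_one 0 n, List.foldl_map, bench_not_foldl]
  simp only [List.length_range, Bool.false_eq_true, if_false]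
  omega
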